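-- pv_equiv track=rewrite | github.com/joemalk/Atiyah_Sutcliffe | Euclidean_and_hyperbolic_AS_style_evaluation_associated_to_graph.py | graph_from_subset
-- ===== SOURCE A (Python) =====
-- def graph_from_subset(subset,n):
--     Ga = {}
--     for a in range(n):
--         for b in range(a+1,n):
--             if (a,b) in subset:
--                 Ga[a] = Ga.get(a,set()).union(set({b}))
--                 Ga[b] = Ga.get(b,set()).union(set({a}))
--     return Ga
-- ===== SOURCE B (Python) =====
-- def graph_from_subset(subset, n):
--     edges = sorted({(a, b) for (a, b) in subset if 0 <= a < b < n})
--     Ga = {}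
--     for a, b in edges:
--         Ga.setdefault(a, set()).add(b)
--         Ga.setdefault(b, set()).add(a)
--     return Ga
-- ===== Notes on version B (the rewrite author's own statement) =====
-- stated objective: faster
-- what changed: Instead of scanning all O(n^2) ordered pairs and testing each for membership in subset, B filters the subset's edges to those with 0<=a<b<n, sorts the distinct ones (recovering A's lexicographic processing order), and builds the adjacency dict in one pass over them.
import Mathlib
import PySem

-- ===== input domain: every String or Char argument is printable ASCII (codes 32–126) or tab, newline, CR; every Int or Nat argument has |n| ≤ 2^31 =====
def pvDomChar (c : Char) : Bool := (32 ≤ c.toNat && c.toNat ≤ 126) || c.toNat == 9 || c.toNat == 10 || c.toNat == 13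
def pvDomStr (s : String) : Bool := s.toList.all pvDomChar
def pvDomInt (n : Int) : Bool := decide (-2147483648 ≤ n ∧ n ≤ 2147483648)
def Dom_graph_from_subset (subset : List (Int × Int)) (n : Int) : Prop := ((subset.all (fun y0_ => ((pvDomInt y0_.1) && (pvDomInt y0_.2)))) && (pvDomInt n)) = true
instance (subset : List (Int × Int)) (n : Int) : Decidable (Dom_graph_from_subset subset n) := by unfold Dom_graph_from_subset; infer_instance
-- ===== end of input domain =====

-- B replaces A's scan of all O(n^2) ordered pairs by a single pass over the subset's
-- valid edges, sorted; objective: faster (asymptotic, O(|subset| log |subset|)).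

-- ===== PORT A =====
-- for a in range(n): for b in range(a+1, n): if (a,b) in subset:
--   Ga[a] = Ga.get(a,set()).union({b}); Ga[b] = Ga.get(b,set()).union({a})
def graph_from_subset (subset : List (Int × Int)) (n : Int) : List (Int × List Int) :=
  ((PySem.List.pyRange 0 n).foldl (fun Ga a =>
      (PySem.List.pyRange (a + 1) n).foldl (fun Ga b =>
        if (a, b) ∈ subset then
          let Ga1 := Ga.insert a (PySem.Set.union (Ga.getD a PySem.Set.empty) (PySem.Set.ofList [b]))
          Ga1.insert b (PySem.Set.union (Ga1.getD b PySem.Set.empty) (PySem.Set.ofList [a]))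
        else Ga) Ga)
    (PySem.Dict.empty : PySem.Dict Int (PySem.Set Int))).items

-- ===== PORT B =====
-- edges = sorted({(a,b) for (a,b) in subset if 0 <= a < b < n});
-- for a, b in edges: Ga.setdefault(a,set()).add(b); Ga.setdefault(b,set()).add(a)
def graph_from_subset_alt (subset : List (Int × Int)) (n : Int) : List (Int × List Int) :=
  let edges := PySem.List.sorted2
    (PySem.Set.ofList (subset.filter (fun p => decide (0 ≤ p.1) && decide (p.1 < p.2) && decide (p.2 < n))))
    (fun p => p.1) (fun p => p.2)
  (edges.foldl (fun Ga p =>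
      let Ga1 := Ga.modify p.1 PySem.Set.empty (fun s => PySem.Set.add s p.2)
      Ga1.modify p.2 PySem.Set.empty (fun s => PySem.Set.add s p.1))
    (PySem.Dict.empty : PySem.Dict Int (PySem.Set Int))).items

-- ===== PRECONDITION & SPEC =====
def Spec_graph_from_subset (subset : List (Int × Int)) (n : Int) (out : List (Int × List Int)) : Prop := out = graph_from_subset_alt subset n
instance (subset : List (Int × Int)) (n : Int) (out : List (Int × List Int)) : Decidable (Spec_graph_from_subset subset n out) := by unfold Spec_graph_from_subset; infer_instance

-- ===== CLAIM (what is proved, stated in full; the proofs are below) =====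
def Claim_equal_graph_from_subset : Prop := ∀ (subset : List (Int × Int)) (n : Int), Dom_graph_from_subset subset n → Spec_graph_from_subset subset n (graph_from_subset subset n)

-- ===== LEMMAS AND PROOFS =====

-- the per-edge dictionary update both loops perform (B's form; A's form is definitionally equal)
def pvStep (Ga : PySem.Dict Int (PySem.Set Int)) (p : Int × Int) : PySem.Dict Int (PySem.Set Int) :=
  let Ga1 := Ga.modify p.1 PySem.Set.empty (fun s => PySem.Set.add s p.2)
  Ga1.modify p.2 PySem.Set.empty (fun s => PySem.Set.add s p.1)

-- the exact sequence of edges A's nested scan acts on, in A's order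
def pvPairs (subset : List (Int × Int)) (n : Int) : List (Int × Int) :=
  (PySem.List.pyRange 0 n).flatMap (fun a =>
    ((PySem.List.pyRange (a + 1) n).filter (fun b => decide ((a, b) ∈ subset))).map (fun b => (a, b)))

def pvLe (p q : Int × Int) : Prop := p.1 < q.1 ∨ (p.1 = q.1 ∧ p.2 ≤ q.2)
def pvLt (p q : Int × Int) : Prop := p.1 < q.1 ∨ (p.1 = q.1 ∧ p.2 < q.2)

def pvBefore (p q : Int × Int) : Bool :=
  decide (p.1 < q.1) || (!decide (q.1 < p.1) && decide (p.2 < q.2))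

lemma pvLe_trans {p q r : Int × Int} (h1 : pvLe p q) (h2 : pvLe q r) : pvLe p r := by
  rcases p with ⟨a, b⟩; rcases q with ⟨c, d⟩; rcases r with ⟨e, f⟩
  simp [pvLe] at *; omega

lemma pvBefore_true_le {p q : Int × Int} (h : pvBefore p q = true) : pvLe p q := by
  rcases p with ⟨a, b⟩; rcases q with ⟨c, d⟩
  simp [pvBefore] at h; simp [pvLe]; omega

lemma pvBefore_false_le {p q : Int × Int} (h : pvBefore p q = false) : pvLe q p := by
  rcases p with ⟨a, b⟩; rcases q with ⟨c, d⟩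
  simp [pvBefore] at h; simp [pvLe]; omega

lemma pvInsertBy_pairwise (x : Int × Int) :
    ∀ ys : List (Int × Int), ys.Pairwise pvLe →
      (PySem.List.insertBy pvBefore x ys).Pairwise pvLe := by
  intro ys
  induction ys with
  | nil => intro _; simp [PySem.List.insertBy]
  | cons y ys ih =>
    intro h
    rw [List.pairwise_cons] at h
    obtain ⟨hy, hys⟩ := h
    by_cases hb : pvBefore x y = true
    · rw [show PySem.List.insertBy pvBefore x (y :: ys) = x :: y :: ys by
        simp [PySem.List.insertBy, hb]]
      refine List.pairwise_cons.mpr ⟨?_, List.pairwise_cons.mpr ⟨hy, hys⟩⟩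
      intro z hz
      rcases List.mem_cons.mp hz with rfl | hz
      · exact pvBefore_true_le hb
      · exact pvLe_trans (pvBefore_true_le hb) (hy z hz)
    · rw [show PySem.List.insertBy pvBefore x (y :: ys) = y :: PySem.List.insertBy pvBefore x ys by
        simp [PySem.List.insertBy, hb]]
      refine List.pairwise_cons.mpr ⟨?_, ih hys⟩
      intro z hz
      rcases (PySem.List.insertBy_mem_iff pvBefore x z ys).mp hz with rfl | hz
      · exact pvBefore_false_le (Bool.not_eq_true _ ▸ hb)
      · exact hy z hz

lemma pvFoldInsert_pairwise (xs : List (Int × Int)) :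
    ∀ acc : List (Int × Int), acc.Pairwise pvLe →
      (xs.foldl (fun acc x => PySem.List.insertBy pvBefore x acc) acc).Pairwise pvLe := by
  induction xs with
  | nil => intro acc h; simpa using h
  | cons x xs ih =>
    intro acc h
    exact ih _ (pvInsertBy_pairwise x acc h)

lemma pvSorted2_pairwise (xs : List (Int × Int)) :
    (PySem.List.sorted2 xs (fun p => p.1) (fun p => p.2)).Pairwise pvLe := by
  have : PySem.List.sorted2 xs (fun p : Int × Int => p.1) (fun p => p.2) =
      xs.foldl (fun acc x => PySem.List.insertBy pvBefore x acc) [] := rfl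
  rw [this]
  exact pvFoldInsert_pairwise xs [] (by simp)

lemma pvSorted2_eq_of_perm_of_pairwise (xs ys : List (Int × Int))
    (hperm : ys.Perm xs) (hp : ys.Pairwise pvLe) :
    PySem.List.sorted2 xs (fun p => p.1) (fun p => p.2) = ys := by
  refine List.Perm.eq_of_pairwise ?_ (pvSorted2_pairwise xs) hp
    ((PySem.List.sorted2_perm xs _ _ false).trans hperm.symm)
  intro a b _ _ hab hba
  rcases a with ⟨a1, a2⟩; rcases b with ⟨b1, b2⟩
  simp [pvLe] at hab hba
  have : a1 = b1 ∧ a2 = b2 := by omega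
  simp [this.1, this.2]

lemma pvPairs_pairwise_lt (subset : List (Int × Int)) (n : Int) :
    (pvPairs subset n).Pairwise pvLt := by
  rw [pvPairs, List.pairwise_flatMap]
  constructor
  · intro a _
    rw [List.pairwise_map]
    exact ((PySem.List.pairwise_lt_pyRange_one (a + 1) n).filter _).imp
      (fun h => Or.inr ⟨rfl, h⟩)
  · refine (PySem.List.pairwise_lt_pyRange_one 0 n).imp ?_
    intro a1 a2 h x hx y hy
    obtain ⟨b1, _, rfl⟩ := List.mem_map.mp hx
    obtain ⟨b2, _, rfl⟩ := List.mem_map.mp hy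
    exact Or.inl h

lemma pvPairs_nodup (subset : List (Int × Int)) (n : Int) : (pvPairs subset n).Nodup := by
  refine (pvPairs_pairwise_lt subset n).imp ?_
  rintro ⟨a1, a2⟩ ⟨b1, b2⟩ h
  simp [pvLt] at h
  intro he
  rw [Prod.mk.injEq] at he
  omega

lemma mem_pvPairs (subset : List (Int × Int)) (n : Int) (p : Int × Int) :
    p ∈ pvPairs subset n ↔ (0 ≤ p.1 ∧ p.1 < p.2 ∧ p.2 < n ∧ p ∈ subset) := by
  rcases p with ⟨x, y⟩
  simp only [pvPairs, List.mem_flatMap, List.mem_map, List.mem_filter,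
    PySem.List.mem_pyRange_one, decide_eq_true_eq]
  constructor
  · rintro ⟨a, ⟨ha0, _⟩, b, ⟨⟨hb1, hb2⟩, hmem⟩, he⟩
    rw [Prod.mk.injEq] at he
    obtain ⟨rfl, rfl⟩ := he
    exact ⟨ha0, by omega, hb2, hmem⟩
  · rintro ⟨h0, h1, h2, hmem⟩
    exact ⟨x, ⟨h0, by omega⟩, y, ⟨⟨by omega, h2⟩, hmem⟩, rfl⟩

lemma pvEdges_perm (subset : List (Int × Int)) (n : Int) :
    (PySem.Set.ofList (subset.filter
        (fun p => decide (0 ≤ p.1) && decide (p.1 < p.2) && decide (p.2 < n)))).Perm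
      (pvPairs subset n) := by
  rw [List.perm_ext_iff_of_nodup (PySem.Set.nodup_ofList _) (pvPairs_nodup subset n)]
  intro p
  rw [PySem.Set.mem_ofList, List.mem_filter, mem_pvPairs]
  simp only [Bool.and_eq_true, decide_eq_true_eq]
  tauto

lemma pvA_eq (subset : List (Int × Int)) (n : Int) :
    graph_from_subset subset n = ((pvPairs subset n).foldl pvStep PySem.Dict.empty).items := by
  rw [graph_from_subset, pvPairs, List.foldl_flatMap]
  congr 1
  apply PySem.List.foldl_congr_mem
  intro Ga a _
  rw [List.foldl_map, List.foldl_filter]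
  apply PySem.List.foldl_congr_mem
  intro acc b _
  by_cases h : (a, b) ∈ subset <;>
    simp [h, pvStep, PySem.Dict.modify, PySem.Set.union, PySem.Set.update, PySem.Set.ofList,
      PySem.Set.add, PySem.Set.empty]

lemma pvB_eq (subset : List (Int × Int)) (n : Int) :
    graph_from_subset_alt subset n =
      ((PySem.List.sorted2
          (PySem.Set.ofList (subset.filter
            (fun p => decide (0 ≤ p.1) && decide (p.1 < p.2) && decide (p.2 < n))))
          (fun p => p.1) (fun p => p.2)).foldl pvStep PySem.Dict.empty).items := rfl

-- ===== VERDICT (by name: the statement is the Claim_ definition above) =====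
theorem graph_from_subset_spec : Claim_equal_graph_from_subset := by
  intro subset n _
  unfold Spec_graph_from_subset
  rw [pvA_eq, pvB_eq,
    pvSorted2_eq_of_perm_of_pairwise _ _ (pvEdges_perm subset n).symm
      ((pvPairs_pairwise_lt subset n).imp (fun h => by
        rcases h with h | ⟨h1, h2⟩
        · exact Or.inl h
        · exact Or.inr ⟨h1, le_of_lt h2⟩))]
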